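-- pv_equiv track=rewrite | github.com/SAYANWALA4/CP104 | Labs/jawa3252_l08/src/functions.py | list_categorize
-- ===== SOURCE A (Python) =====
-- def list_categorize(values):
--     """
--     -------------------------------------------------------
--     Returns data about the categories of values in a list.
--     Use: negatives, positives, zeroes, evens, odds = list_categorize(values)
--     -------------------------------------------------------
--     Parameters:
--         values - a list of values (list of int)
--     Returns:
--         negatives - the number of negative values (int)
--         positives - the number of positive values (int)
--         zeroes - the number of zeroes (int)
--         evens - the number of even values (int)
--         odds - the number of odd values (int)
--     -------------------------------------------------------
--     """
--     negatives = 0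
--     positives = 0
--     zeroes = 0
--     evens = 0
--     odds = 0
--     for i in range (0, len(values)):
--         number = values[i]
--
--         if(number == 0):
--             zeroes += 1
--             evens += 1
--
--         elif (number % 2 == 0):
--             if (number > 0):
--                 positives += 1
--             elif(number < 0):
--                 negatives += 1
--             evens += 1
--
--         elif(number % 2 != 0):
--             if (number > 0):
--                 positives += 1
--             elif(number < 0):
--                 negatives += 1
--             odds += 1
--
--     return negatives, positives, zeroes, evens, odds
-- ===== SOURCE B (Python) =====
-- def list_categorize(values):
--     negatives = sum(1 for x in values if x < 0)
--     positives = sum(1 for x in values if x > 0)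
--     zeroes = sum(1 for x in values if x == 0)
--     evens = sum(1 for x in values if x % 2 == 0)
--     odds = sum(1 for x in values if x % 2 != 0)
--     return negatives, positives, zeroes, evens, odds
-- ===== Notes on version B (the rewrite author's own statement) =====
-- stated objective: simpler
-- what changed: Replaces the single index loop with interleaved branch-and-mutate counters by five independent one-predicate counts (generator sums), one per returned category.
import Mathlib
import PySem

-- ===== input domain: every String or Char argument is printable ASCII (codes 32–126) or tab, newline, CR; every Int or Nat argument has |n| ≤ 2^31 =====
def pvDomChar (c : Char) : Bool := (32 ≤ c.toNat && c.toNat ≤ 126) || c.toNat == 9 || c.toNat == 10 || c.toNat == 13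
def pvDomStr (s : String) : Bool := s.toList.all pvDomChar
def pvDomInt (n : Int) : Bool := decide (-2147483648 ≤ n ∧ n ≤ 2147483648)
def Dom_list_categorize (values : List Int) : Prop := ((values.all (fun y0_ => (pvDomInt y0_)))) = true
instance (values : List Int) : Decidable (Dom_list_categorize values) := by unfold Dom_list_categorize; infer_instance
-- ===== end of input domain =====

-- B replaces A's single interleaved index loop by five independent one-predicate counts (same values).
-- ===== PORT A =====
def pvStepA : Int × Int × Int × Int × Int → Int → Int × Int × Int × Int × Int
  | (negatives, positives, zeroes, evens, odds), number =>
  if number = 0 then (negatives, positives, zeroes + 1, evens + 1, odds)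
  else if PySem.Int.mod number 2 = 0 then
    if number > 0 then (negatives, positives + 1, zeroes, evens + 1, odds)
    else if number < 0 then (negatives + 1, positives, zeroes, evens + 1, odds)
    else (negatives, positives, zeroes, evens + 1, odds)
  else if PySem.Int.mod number 2 ≠ 0 then
    if number > 0 then (negatives, positives + 1, zeroes, evens, odds + 1)
    else if number < 0 then (negatives + 1, positives, zeroes, evens, odds + 1)
    else (negatives, positives, zeroes, evens, odds + 1)
  else (negatives, positives, zeroes, evens, odds)

-- index i is always in range, so the 0 default of pyGetD is never used
def list_categorize (values : List Int) : Int × Int × Int × Int × Int :=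
  (PySem.List.pyRange 0 (values.length : Int) 1).foldl
    (fun st i => pvStepA st (PySem.List.pyGetD values i 0)) (0, 0, 0, 0, 0)

-- ===== PORT B =====
def list_categorize_alt (values : List Int) : Int × Int × Int × Int × Int :=
  ((values.countP (fun x => x < 0) : Int),
   (values.countP (fun x => x > 0) : Int),
   (values.countP (fun x => x = 0) : Int),
   (values.countP (fun x => PySem.Int.mod x 2 = 0) : Int),
   (values.countP (fun x => PySem.Int.mod x 2 ≠ 0) : Int))

-- ===== PRECONDITION & SPEC =====
def Spec_list_categorize (values : List Int) (out : Int × Int × Int × Int × Int) : Prop := out = list_categorize_alt values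
instance (values : List Int) (out : Int × Int × Int × Int × Int) : Decidable (Spec_list_categorize values out) := by unfold Spec_list_categorize; infer_instance

-- ===== CLAIM (what is proved, stated in full; the proofs are below) =====
def Claim_equal_list_categorize : Prop := ∀ (values : List Int), Dom_list_categorize values → Spec_list_categorize values (list_categorize values)

-- ===== LEMMAS AND PROOFS =====

-- ===== VERDICT (by name: the statement is the Claim_ definition above) =====
set_option maxHeartbeats 1000000 in
lemma pvFold_eq (values : List Int) (a b c d e : Int) :
    values.foldl pvStepA (a, b, c, d, e) =
      (a + (values.countP (fun x => x < 0) : Int),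
       b + (values.countP (fun x => x > 0) : Int),
       c + (values.countP (fun x => x = 0) : Int),
       d + (values.countP (fun x => PySem.Int.mod x 2 = 0) : Int),
       e + (values.countP (fun x => PySem.Int.mod x 2 ≠ 0) : Int)) := by
  induction values generalizing a b c d e with
  | nil => simp
  | cons x xs ih =>
    have hme : PySem.Int.mod x 2 = x % 2 := Int.fmod_eq_emod_of_nonneg x (by norm_num)
    simp only [List.foldl_cons, List.countP_cons, pvStepA, hme]
    split_ifs with h1 h2 h3 h4 h5 h6 h7 <;> rw [ih] <;> clear ih <;>
      simp only [Prod.mk.injEq] <;>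
      refine ⟨?_, ?_, ?_, ?_, ?_⟩ <;>
      push_cast <;>
      (try split_ifs) <;> simp only [decide_eq_true_eq, ne_eq] at * <;> omega

theorem list_categorize_spec : Claim_equal_list_categorize := by
  intro values _
  unfold Spec_list_categorize list_categorize list_categorize_alt
  rw [PySem.List.foldl_pyRange_zero_pyGetD']
  rw [pvFold_eq]
  simp
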